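-- pv_equiv track=rewrite | github.com/ccruz0/crypto-2.0 | backend/scripts/forensic_audit.py | get_tp_sl_for_order
-- ===== SOURCE A (Python) =====
-- from typing import List, Dict, Optional, Tuple, Any
--
-- def get_tp_sl_for_order(order_id: str, orders: List[Dict]) -> Tuple[Optional[Dict], Optional[Dict]]:
--     """Get TP and SL orders for a given parent order"""
--     tp_order = None
--     sl_order = None
--
--     for order in orders:
--         if order['parent_order_id'] == order_id:
--             if order['order_role'] == 'TAKE_PROFIT':
--                 tp_order = order
--             elif order['order_role'] == 'STOP_LOSS':
--                 sl_order = order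
--
--     return tp_order, sl_order
-- ===== SOURCE B (Python) =====
-- def get_tp_sl_for_order(order_id, orders):
--     """Get TP and SL orders for a given parent order (reverse scan, keep first seen = last forward, early exit)."""
--     tp_order = None
--     sl_order = None
--     for order in reversed(orders):
--         if order['parent_order_id'] == order_id:
--             role = order['order_role']
--             if role == 'TAKE_PROFIT' and tp_order is None:
--                 tp_order = order
--             elif role == 'STOP_LOSS' and sl_order is None:
--                 sl_order = order
--             if tp_order is not None and sl_order is not None:
--                 break
--     return tp_order, sl_order
-- ===== Notes on version B (the rewrite author's own statement) =====
-- stated objective: alternative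
-- what changed: B scans the list in reverse, filling each slot only while it is still empty (reverse-first = forward-last) and breaking out as soon as both TP and SL are found, instead of A's full forward scan that keeps overwriting.
-- outside the precondition, e.g. on get_tp_sl_for_order('X', [{'parent_order_id': 'X'}]): A raises KeyError, B raises KeyError; on get_tp_sl_for_order('X', [{'order_role': 'TAKE_PROFIT'}]): A raises KeyError, B raises KeyError
import Mathlib
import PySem

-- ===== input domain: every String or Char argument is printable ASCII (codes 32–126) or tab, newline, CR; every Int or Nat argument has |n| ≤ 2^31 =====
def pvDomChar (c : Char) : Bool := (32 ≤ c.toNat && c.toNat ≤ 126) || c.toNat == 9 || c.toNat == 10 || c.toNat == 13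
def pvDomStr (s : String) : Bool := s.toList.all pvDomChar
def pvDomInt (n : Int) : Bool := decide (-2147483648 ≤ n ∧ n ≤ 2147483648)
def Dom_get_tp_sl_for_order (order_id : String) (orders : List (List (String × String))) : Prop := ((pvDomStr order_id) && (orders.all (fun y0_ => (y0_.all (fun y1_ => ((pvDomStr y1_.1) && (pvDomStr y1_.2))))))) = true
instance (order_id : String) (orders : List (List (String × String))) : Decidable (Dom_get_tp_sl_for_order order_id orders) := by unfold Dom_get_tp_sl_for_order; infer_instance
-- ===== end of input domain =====

-- B scans in reverse, filling each slot only while it is still empty and breaking once both are found;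
-- A is a full forward scan with overwriting. Equal results; objective: alternative decomposition.

-- d[k] (first match in the assoc list); Python raises KeyError when the key is absent — excluded by Pre_
def pvGetKey (o : List (String × String)) (k : String) : Option String := (PySem.Dict.mk o).get? k

-- ===== PORT A =====
def pvStepA (order_id : String) (st : (Option (List (String × String))) × (Option (List (String × String)))) (o : List (String × String)) : (Option (List (String × String))) × (Option (List (String × String))) :=
  if pvGetKey o "parent_order_id" = some order_id then
    if pvGetKey o "order_role" = some "TAKE_PROFIT" then (some o, st.2)
    else if pvGetKey o "order_role" = some "STOP_LOSS" then (st.1, some o)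
    else st
  else st

def get_tp_sl_for_order (order_id : String) (orders : List (List (String × String))) : (Option (List (String × String))) × (Option (List (String × String))) :=
  orders.foldl (pvStepA order_id) (none, none)

-- ===== PORT B =====
-- loop over the (already reversed) list with early break once both slots are filled
def pvLoopB (order_id : String) : List (List (String × String)) → Option (List (String × String)) → Option (List (String × String)) → (Option (List (String × String))) × (Option (List (String × String)))
  | [], tp, sl => (tp, sl)
  | o :: rest, tp, sl =>
    if pvGetKey o "parent_order_id" = some order_id then
      let role := pvGetKey o "order_role"
      let tp' := if role = some "TAKE_PROFIT" ∧ tp = none then some o else tp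
      let sl' := if role = some "STOP_LOSS" ∧ sl = none then some o else sl
      if tp'.isSome ∧ sl'.isSome then (tp', sl') else pvLoopB order_id rest tp' sl'
    else pvLoopB order_id rest tp sl

def get_tp_sl_for_order_alt (order_id : String) (orders : List (List (String × String))) : (Option (List (String × String))) × (Option (List (String × String))) :=
  pvLoopB order_id orders.reverse none none

-- ===== PRECONDITION & SPEC =====
-- Pre_ excludes exactly the inputs where Python A raises KeyError: an order missing the
-- 'parent_order_id' key, or a matching order missing the 'order_role' key.
def Pre_get_tp_sl_for_order (order_id : String) (orders : List (List (String × String))) : Prop :=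
  ∀ o ∈ orders, (pvGetKey o "parent_order_id").isSome = true ∧
    (pvGetKey o "parent_order_id" = some order_id → (pvGetKey o "order_role").isSome = true)
instance (order_id : String) (orders : List (List (String × String))) : Decidable (Pre_get_tp_sl_for_order order_id orders) := by unfold Pre_get_tp_sl_for_order; infer_instance

def pvWitness_get_tp_sl_for_order : String × (List (List (String × String))) :=
  ("X", [[("parent_order_id", "X"), ("order_role", "TAKE_PROFIT")], [("parent_order_id", "X"), ("order_role", "STOP_LOSS")]])

def Spec_get_tp_sl_for_order (order_id : String) (orders : List (List (String × String))) (out : (Option (List (String × String))) × (Option (List (String × String)))) : Prop := out = get_tp_sl_for_order_alt order_id orders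
instance (order_id : String) (orders : List (List (String × String))) (out : (Option (List (String × String))) × (Option (List (String × String)))) : Decidable (Spec_get_tp_sl_for_order order_id orders out) := by unfold Spec_get_tp_sl_for_order; infer_instance

-- ===== CLAIM (what is proved, stated in full; the proofs are below) =====
def Claim_equal_get_tp_sl_for_order : Prop := ∀ (order_id : String) (orders : List (List (String × String))), Dom_get_tp_sl_for_order order_id orders → Pre_get_tp_sl_for_order order_id orders → Spec_get_tp_sl_for_order order_id orders (get_tp_sl_for_order order_id orders)

-- ===== LEMMAS AND PROOFS =====

-- B's reverse scan with first-wins slots equals A's forward fold: reverse-first = forward-last.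
lemma pvLoopB_eq (order_id : String) (l : List (List (String × String))) (tp sl : Option (List (String × String))) :
    pvLoopB order_id l tp sl =
      (tp.or (l.reverse.foldl (pvStepA order_id) (none, none)).1,
       sl.or (l.reverse.foldl (pvStepA order_id) (none, none)).2) := by
  induction l generalizing tp sl with
  | nil => simp [pvLoopB]
  | cons o rest ih =>
    simp only [List.reverse_cons, List.foldl_append, List.foldl_cons, List.foldl_nil]
    rw [pvLoopB]
    by_cases hp : pvGetKey o "parent_order_id" = some order_id
    · by_cases htp : pvGetKey o "order_role" = some "TAKE_PROFIT"
      · by_cases hsl : pvGetKey o "order_role" = some "STOP_LOSS"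
        · rw [htp] at hsl; simp at hsl
        · rcases tp with _ | t <;> rcases sl with _ | s <;>
            simp [pvStepA, hp, htp, ih]
      · by_cases hsl : pvGetKey o "order_role" = some "STOP_LOSS" <;>
          (rcases tp with _ | t <;> rcases sl with _ | s <;>
            simp [pvStepA, hp, htp, hsl, ih])
    · rw [if_neg hp, ih]
      simp [pvStepA, hp]

-- ===== VERDICT (by name: the statement is the Claim_ definition above) =====
theorem get_tp_sl_for_order_spec : Claim_equal_get_tp_sl_for_order := by
  intro order_id orders _ _
  unfold Spec_get_tp_sl_for_order get_tp_sl_for_order get_tp_sl_for_order_alt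
  rw [pvLoopB_eq]
  simp
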